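-- pv_equiv track=rewrite | github.com/ramnreddy15/AI-Course | Unit2/L4/Reddy_R_U2_L4.py | sudoku_neighbors
-- ===== SOURCE A (Python) =====
-- def sudoku_neighbors(csp_table): # {0:[0, 1, 2, 3, 4, ...., 8, 9, 18, 27, 10, 11, 19, 20], 1:
--    neighbors = {}
--    for i in range(81):
--     for table in csp_table:
--         if i in table:
--             for val in table:
--                 if i in neighbors.keys():
--                     if val not in neighbors[i]:
--                        neighbors[i].append(val)
--                 else:
--                     neighbors[i] = [val]
--    return neighbors
-- ===== SOURCE B (Python) =====
-- def sudoku_neighbors(csp_table):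
--     # Index tables by cell in one pass, then build each cell's dedup'd
--     # neighbor list only from the tables that actually contain it.
--     by_cell = {}
--     for table in csp_table:
--         for c in dict.fromkeys(table):
--             if 0 <= c < 81:
--                 by_cell.setdefault(c, []).append(table)
--     neighbors = {}
--     for i in range(81):
--         if i in by_cell:
--             vals = []
--             seen = set()
--             for table in by_cell[i]:
--                 for v in table:
--                     if v not in seen:
--                         seen.add(v)
--                         vals.append(v)
--             neighbors[i] = vals
--     return neighbors
-- ===== Notes on version B (the rewrite author's own statement) =====
-- stated objective: faster
-- what changed: Instead of scanning every table for each of the 81 cells (81 passes over csp_table with list-membership dedup), B indexes tables by cell in a single pass and then builds each present cell's neighbor list only from its own tables, deduplicating with a per-cell set.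
import Mathlib
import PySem

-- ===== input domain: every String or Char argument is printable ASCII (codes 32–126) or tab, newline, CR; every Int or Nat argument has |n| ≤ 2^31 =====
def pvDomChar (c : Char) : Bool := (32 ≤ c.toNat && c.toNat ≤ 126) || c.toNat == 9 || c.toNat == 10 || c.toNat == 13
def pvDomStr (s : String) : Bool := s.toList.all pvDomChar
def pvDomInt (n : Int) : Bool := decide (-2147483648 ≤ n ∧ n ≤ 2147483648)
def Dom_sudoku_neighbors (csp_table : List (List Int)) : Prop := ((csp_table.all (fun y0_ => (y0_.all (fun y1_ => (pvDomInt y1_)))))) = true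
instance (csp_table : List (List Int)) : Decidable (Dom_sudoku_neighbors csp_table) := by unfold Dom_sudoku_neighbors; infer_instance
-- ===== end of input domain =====

-- B indexes tables by cell in one pass and dedups with a per-cell set, instead of
-- scanning every table for each of the 81 cells; return value proved identical.

-- ===== PORT A =====
-- body of 'for val in table:' (one val step)
def snA_val (i : Int) (neighbors : PySem.Dict Int (List Int)) (val : Int) :
    PySem.Dict Int (List Int) :=
  if neighbors.contains i then
    (if val ∈ neighbors.getD i [] then neighbors
     else neighbors.modify i [] (fun l => l ++ [val]))   -- neighbors[i].append(val)
  else neighbors.insert i [val]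

-- body of 'for table in csp_table:'
def snA_table (i : Int) (neighbors : PySem.Dict Int (List Int)) (table : List Int) :
    PySem.Dict Int (List Int) :=
  if i ∈ table then table.foldl (snA_val i) neighbors else neighbors

-- body of 'for i in range(81):'
def snA_cell (csp_table : List (List Int)) (neighbors : PySem.Dict Int (List Int)) (i : Int) :
    PySem.Dict Int (List Int) :=
  csp_table.foldl (snA_table i) neighbors

def sudoku_neighbors (csp_table : List (List Int)) : List (Int × List Int) :=
  ((PySem.List.pyRange 0 81 1).foldl (snA_cell csp_table) PySem.Dict.empty).items

-- ===== PORT B =====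
-- 'for c in dict.fromkeys(table): if 0 <= c < 81: by_cell.setdefault(c, []).append(table)'
-- (setdefault-then-in-place-append = modify with default [])
def snB_idx (bc : PySem.Dict Int (List (List Int))) (table : List Int) :
    PySem.Dict Int (List (List Int)) :=
  (PySem.Set.ofList table).foldl
    (fun bc c => if 0 ≤ c ∧ c < 81 then bc.modify c [] (fun ts => ts ++ [table]) else bc) bc

-- 'if v not in seen: seen.add(v); vals.append(v)'  on the state (vals, seen)
def snB_dedup (a : List Int × PySem.Set Int) (v : Int) : List Int × PySem.Set Int :=
  if v ∈ a.2 then a else (a.1 ++ [v], PySem.Set.add a.2 v)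

-- the 'vals/seen' loop over by_cell[i]
def snB_vals (tabs : List (List Int)) : List Int :=
  (tabs.foldl (fun a table => table.foldl snB_dedup a) (([] : List Int), ([] : PySem.Set Int))).1

def sudoku_neighbors_alt (csp_table : List (List Int)) : List (Int × List Int) :=
  let by_cell : PySem.Dict Int (List (List Int)) :=
    csp_table.foldl snB_idx PySem.Dict.empty
  ((PySem.List.pyRange 0 81 1).foldl
      (fun nb i =>
        if by_cell.contains i then nb.insert i (snB_vals (by_cell.getD i [])) else nb)
      PySem.Dict.empty).items

-- ===== PRECONDITION & SPEC =====
def Spec_sudoku_neighbors (csp_table : List (List Int)) (out : List (Int × List Int)) : Prop := out = sudoku_neighbors_alt csp_table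
instance (csp_table : List (List Int)) (out : List (Int × List Int)) : Decidable (Spec_sudoku_neighbors csp_table out) := by unfold Spec_sudoku_neighbors; infer_instance

-- ===== CLAIM (what is proved, stated in full; the proofs are below) =====
def Claim_equal_sudoku_neighbors : Prop := ∀ (csp_table : List (List Int)), Dom_sudoku_neighbors csp_table → Spec_sudoku_neighbors csp_table (sudoku_neighbors csp_table)

-- ===== LEMMAS AND PROOFS =====

-- the deduplicated concatenation of all tables containing i, in order
def snCollect (L : List (List Int)) (i : Int) : List Int :=
  L.foldl (fun a t => if i ∈ t then PySem.Set.update a t else a) []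

-- the canonical per-cell step both ports are reduced to
def snCanon (L : List (List Int)) (d : PySem.Dict Int (List Int)) (i : Int) :
    PySem.Dict Int (List Int) :=
  if snCollect L i = [] then d else d.insert i (snCollect L i)

lemma snAdd_ne_nil (acc : List Int) (v : Int) : PySem.Set.add acc v ≠ [] := by
  rw [PySem.Set.add_eq_ite]
  split
  · exact List.ne_nil_of_mem (by assumption)
  · simp

lemma A_inner (i : Int) (vs : List Int) (d : PySem.Dict Int (List Int))
    (hd : d.contains i = false) (acc : List Int) :
    vs.foldl (snA_val i) (if acc = [] then d else d.insert i acc)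
      = (if PySem.Set.update acc vs = [] then d else d.insert i (PySem.Set.update acc vs)) := by
  induction vs generalizing acc with
  | nil => simp [PySem.Set.update]
  | cons v vs ih =>
    rw [List.foldl_cons, PySem.Set.update_cons]
    have hone : snA_val i (if acc = [] then d else d.insert i acc) v
        = d.insert i (PySem.Set.add acc v) := by
      by_cases hacc : acc = []
      · subst hacc
        simp [snA_val, hd, PySem.Set.add]
      · rw [if_neg hacc]
        by_cases hv : v ∈ acc
        · rw [PySem.Set.add_of_mem hv]
          simp [snA_val, PySem.Dict.contains_insert_self, PySem.Dict.getD_insert_self, hv]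
        · rw [PySem.Set.add_of_not_mem hv]
          simp [snA_val, PySem.Dict.contains_insert_self, PySem.Dict.getD_insert_self, hv,
            PySem.Dict.modify, PySem.Dict.insert_insert_self]
    rw [hone]
    have h := ih (PySem.Set.add acc v)
    rwa [if_neg (snAdd_ne_nil acc v)] at h

lemma A_tables (i : Int) (L : List (List Int)) (d : PySem.Dict Int (List Int))
    (hd : d.contains i = false) (acc : List Int) :
    L.foldl (snA_table i) (if acc = [] then d else d.insert i acc)
      = (if L.foldl (fun a t => if i ∈ t then PySem.Set.update a t else a) acc = [] then d
         else d.insert i (L.foldl (fun a t => if i ∈ t then PySem.Set.update a t else a) acc)) := by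
  induction L generalizing acc with
  | nil => simp
  | cons t L ih =>
    rw [List.foldl_cons, List.foldl_cons]
    by_cases ht : i ∈ t
    · rw [if_pos ht, snA_table, if_pos ht, A_inner i t d hd acc, ih]
    · rw [if_neg ht, snA_table, if_neg ht, ih]

lemma A_outer (L : List (List Int)) (n : ℕ) : ∀ (a : Int) (d : PySem.Dict Int (List Int)),
    n = (81 - a).toNat → (∀ k ∈ d.keys, k < a) →
    (PySem.List.pyRange a 81 1).foldl (snA_cell L) d
      = (PySem.List.pyRange a 81 1).foldl (snCanon L) d := by
  induction n with
  | zero =>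
    intro a d hn _
    rw [PySem.List.pyRange_one_eq_nil (a := a) (b := 81) (by omega)]
    rfl
  | succ m ih =>
    intro a d hn hk
    have ha : a < 81 := by omega
    rw [PySem.List.pyRange_one_cons ha, List.foldl_cons, List.foldl_cons]
    have hd : d.contains a = false := by
      by_cases h : d.contains a = true
      · exact absurd (lt_irrefl a) (by simpa using hk a ((PySem.Dict.contains_iff_mem_keys d a).mp h))
      · simpa using h
    have hstep : snA_cell L d a = snCanon L d a := by
      have h := A_tables a L d hd []
      rw [if_pos rfl] at h
      exact h
    rw [hstep]
    apply ih (a + 1) _ (by omega)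
    intro k hk'
    unfold snCanon at hk'
    by_cases hc : snCollect L a = []
    · rw [if_pos hc] at hk'; exact lt_trans (hk k hk') (by omega)
    · rw [if_neg hc] at hk'
      rcases (PySem.Dict.mem_keys_insert d a k (snCollect L a)).mp hk' with h | h
      · omega
      · exact lt_trans (hk k h) (by omega)

-- B index pass: the value at cell i is the list of tables containing i, in order
lemma B_idx1_getD (table : List Int) (cs : List Int) (hnd : cs.Nodup) (i : Int)
    (hi : 0 ≤ i ∧ i < 81) (bc : PySem.Dict Int (List (List Int))) :
    (cs.foldl (fun bc c => if 0 ≤ c ∧ c < 81 then bc.modify c [] (fun ts => ts ++ [table]) else bc) bc).getD i []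
      = bc.getD i [] ++ (if i ∈ cs then [table] else []) := by
  induction cs generalizing bc with
  | nil => simp
  | cons c cs ih =>
    rcases List.nodup_cons.mp hnd with ⟨hc, hnd'⟩
    rw [List.foldl_cons, ih hnd']
    by_cases hci : c = i
    · subst hci
      rw [if_pos hi, PySem.Dict.getD_modify]
      simp [hc]
    · have hgd : (if 0 ≤ c ∧ c < 81 then bc.modify c [] (fun ts => ts ++ [table]) else bc).getD i []
          = bc.getD i [] := by
        split
        · exact PySem.Dict.getD_modify_of_ne bc [] _ (Ne.symm hci)
        · rfl
      rw [hgd]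
      simp [List.mem_cons, Ne.symm hci]

lemma B_idx1_contains (table : List Int) (cs : List Int) (i : Int)
    (hi : 0 ≤ i ∧ i < 81) (bc : PySem.Dict Int (List (List Int))) :
    (cs.foldl (fun bc c => if 0 ≤ c ∧ c < 81 then bc.modify c [] (fun ts => ts ++ [table]) else bc) bc).contains i
      = (bc.contains i || decide (i ∈ cs)) := by
  induction cs generalizing bc with
  | nil => simp
  | cons c cs ih =>
    rw [List.foldl_cons, ih]
    by_cases hci : c = i
    · subst hci
      rw [if_pos hi, PySem.Dict.contains_modify]
      simp
    · have : (if 0 ≤ c ∧ c < 81 then bc.modify c [] (fun ts => ts ++ [table]) else bc).contains i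
          = bc.contains i := by
        split
        · rw [PySem.Dict.contains_modify]; simp [Ne.symm hci]
        · rfl
      rw [this]
      simp [List.mem_cons, Ne.symm hci]

lemma B_idx_getD (L : List (List Int)) (i : Int) (hi : 0 ≤ i ∧ i < 81)
    (bc : PySem.Dict Int (List (List Int))) :
    (L.foldl snB_idx bc).getD i [] = bc.getD i [] ++ L.filter (fun t => decide (i ∈ t)) := by
  induction L generalizing bc with
  | nil => simp
  | cons t L ih =>
    rw [List.foldl_cons, ih]
    have h1 : snB_idx bc t
        = (PySem.Set.ofList t).foldl
            (fun bc c => if 0 ≤ c ∧ c < 81 then bc.modify c [] (fun ts => ts ++ [t]) else bc) bc := rfl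
    rw [h1, B_idx1_getD t (PySem.Set.ofList t) (PySem.Set.nodup_ofList t) i hi bc]
    rw [List.filter_cons]
    by_cases ht : i ∈ t
    · simp [(PySem.Set.mem_ofList t i).mpr ht, ht]
    · simp [ht]

lemma B_idx_contains (L : List (List Int)) (i : Int) (hi : 0 ≤ i ∧ i < 81)
    (bc : PySem.Dict Int (List (List Int))) :
    (L.foldl snB_idx bc).contains i = (bc.contains i || decide (∃ t ∈ L, i ∈ t)) := by
  induction L generalizing bc with
  | nil => simp
  | cons t L ih =>
    rw [List.foldl_cons, ih]
    have h1 : snB_idx bc t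
        = (PySem.Set.ofList t).foldl
            (fun bc c => if 0 ≤ c ∧ c < 81 then bc.modify c [] (fun ts => ts ++ [t]) else bc) bc := rfl
    rw [h1, B_idx1_contains t (PySem.Set.ofList t) i hi bc]
    by_cases ht : i ∈ t
    · simp [(PySem.Set.mem_ofList t i).mpr ht, ht]
    · simp [ht]

-- the (vals, seen) pair fold computes Set.update on the vals component
lemma B_dedup_pair (vs : List Int) : ∀ (p : List Int × PySem.Set Int),
    (∀ x, x ∈ p.2 ↔ x ∈ p.1) →
    (vs.foldl snB_dedup p).1 = PySem.Set.update p.1 vs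
      ∧ (∀ x, x ∈ (vs.foldl snB_dedup p).2 ↔ x ∈ (vs.foldl snB_dedup p).1) := by
  induction vs with
  | nil => intro p hp; exact ⟨rfl, hp⟩
  | cons v vs ih =>
    intro p hp
    rw [List.foldl_cons, PySem.Set.update_cons]
    by_cases hv : v ∈ p.1
    · have hstep : snB_dedup p v = p := by
        simp [snB_dedup, (hp v).mpr hv]
      rw [hstep, PySem.Set.add_of_mem hv]
      exact ih p hp
    · have hstep : snB_dedup p v = (p.1 ++ [v], PySem.Set.add p.2 v) := by
        have hv2 : v ∉ p.2 := fun h => hv ((hp v).mp h)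
        simp [snB_dedup, hv2]
      rw [hstep, ← PySem.Set.add_of_not_mem hv]
      apply ih
      intro x
      rw [PySem.Set.add_of_not_mem hv]
      simp [PySem.Set.mem_add, hp x, or_comm]
    
lemma B_vals_eq (tabs : List (List Int)) :
    snB_vals tabs = tabs.foldl (fun a t => PySem.Set.update a t) [] := by
  unfold snB_vals
  suffices h : ∀ (p : List Int × PySem.Set Int), (∀ x, x ∈ p.2 ↔ x ∈ p.1) →
      (tabs.foldl (fun a table => table.foldl snB_dedup a) p).1
        = tabs.foldl (fun a t => PySem.Set.update a t) p.1
      ∧ (∀ x, x ∈ (tabs.foldl (fun a table => table.foldl snB_dedup a) p).2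
            ↔ x ∈ (tabs.foldl (fun a table => table.foldl snB_dedup a) p).1) by
    exact (h ([], []) (by simp)).1
  induction tabs with
  | nil => intro p hp; exact ⟨rfl, hp⟩
  | cons t tabs ih =>
    intro p hp
    rw [List.foldl_cons, List.foldl_cons]
    obtain ⟨h1, h2⟩ := B_dedup_pair t p hp
    obtain ⟨h3, h4⟩ := ih (t.foldl snB_dedup p) h2
    exact ⟨by rw [h3, h1], h4⟩

lemma mem_snCollect_aux (i : Int) (L : List (List Int)) : ∀ (acc : List Int),
    i ∈ acc ∨ (∃ t ∈ L, i ∈ t) →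
    i ∈ L.foldl (fun a t => if i ∈ t then PySem.Set.update a t else a) acc := by
  induction L with
  | nil => intro acc h; simpa using h
  | cons t L ih =>
    intro acc h
    rw [List.foldl_cons]
    by_cases ht : i ∈ t
    · rw [if_pos ht]
      exact ih _ (Or.inl ((PySem.Set.mem_update acc t i).mpr (Or.inr ht)))
    · rw [if_neg ht]
      apply ih
      rcases h with h | ⟨t', ht', hi'⟩
      · exact Or.inl h
      · rcases List.mem_cons.mp ht' with rfl | h'
        · exact absurd hi' ht
        · exact Or.inr ⟨t', h', hi'⟩

lemma snCollect_ne_nil (L : List (List Int)) (i : Int) (h : ∃ t ∈ L, i ∈ t) :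
    snCollect L i ≠ [] :=
  List.ne_nil_of_mem (mem_snCollect_aux i L [] (Or.inr h))

lemma snCollect_nil (L : List (List Int)) (i : Int) (h : ¬ ∃ t ∈ L, i ∈ t) :
    snCollect L i = [] := by
  unfold snCollect
  induction L with
  | nil => rfl
  | cons t L ih =>
    rw [List.foldl_cons, if_neg (fun ht => h ⟨t, List.mem_cons_self, ht⟩)]
    exact ih (fun ⟨t', ht', hi'⟩ => h ⟨t', List.mem_cons_of_mem t ht', hi'⟩)

lemma snCollect_eq_filter (L : List (List Int)) (i : Int) :
    snCollect L i = (L.filter (fun t => decide (i ∈ t))).foldl (fun a t => PySem.Set.update a t) [] := by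
  unfold snCollect
  rw [List.foldl_filter]
  simp

-- ===== VERDICT (by name: the statement is the Claim_ definition above) =====
theorem sudoku_neighbors_spec : Claim_equal_sudoku_neighbors := by
  intro csp_table _
  unfold Spec_sudoku_neighbors sudoku_neighbors sudoku_neighbors_alt
  rw [A_outer csp_table 81 0 PySem.Dict.empty rfl (by simp [PySem.Dict.keys_empty])]
  congr 1
  apply PySem.List.foldl_congr_mem
  intro nb i hi
  have hi' : 0 ≤ i ∧ i < 81 := by
    have := PySem.List.mem_pyRange_one.mp hi
    exact ⟨this.1, this.2⟩
  rw [B_idx_contains csp_table i hi' PySem.Dict.empty, B_idx_getD csp_table i hi' PySem.Dict.empty]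
  simp only [PySem.Dict.contains_empty, PySem.Dict.getD_empty, Bool.false_or, List.nil_append]
  by_cases h : ∃ t ∈ csp_table, i ∈ t
  · rw [if_pos (by simpa using h)]
    unfold snCanon
    rw [if_neg (snCollect_ne_nil csp_table i h), B_vals_eq, ← snCollect_eq_filter]
  · rw [if_neg (by simpa using h)]
    unfold snCanon
    rw [if_pos (snCollect_nil csp_table i h)]
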